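-- pv_equiv track=rewrite | github.com/tal-sharon/intro2cs | ex07/ex7.py | ones_single_num
-- ===== SOURCE A (Python) =====
-- def ones_single_num(n: int, count: int) -> int:
--     """
--     a sub-function which counts the number of ones in a single number
--     :param n: the number
--     :param count: the general count
--     :return: the new count
--     """
--     if n == 0:
--         return count
--     if n % 10 == 1:
--         count += 1
--     if n >= 10:
--         count = ones_single_num(n // 10, count)
--     return count
-- ===== SOURCE B (Python) =====
-- def ones_single_num(n: int, count: int) -> int:
--     """
--     a sub-function which counts the number of ones in a single number
--     :param n: the number
--     :param count: the general count
--     :return: the new count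
--     """
--     while n >= 10:
--         n, last = divmod(n, 10)
--         if last == 1:
--             count += 1
--     if n % 10 == 1:
--         count += 1
--     return count
-- ===== Notes on version B (the rewrite author's own statement) =====
-- stated objective: simpler
-- what changed: Replaces the count-threading recursion with a plain while-loop that strips digits via divmod while n >= 10 and then checks the remaining last digit once; no recursion and no early-return chain.
import Mathlib
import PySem

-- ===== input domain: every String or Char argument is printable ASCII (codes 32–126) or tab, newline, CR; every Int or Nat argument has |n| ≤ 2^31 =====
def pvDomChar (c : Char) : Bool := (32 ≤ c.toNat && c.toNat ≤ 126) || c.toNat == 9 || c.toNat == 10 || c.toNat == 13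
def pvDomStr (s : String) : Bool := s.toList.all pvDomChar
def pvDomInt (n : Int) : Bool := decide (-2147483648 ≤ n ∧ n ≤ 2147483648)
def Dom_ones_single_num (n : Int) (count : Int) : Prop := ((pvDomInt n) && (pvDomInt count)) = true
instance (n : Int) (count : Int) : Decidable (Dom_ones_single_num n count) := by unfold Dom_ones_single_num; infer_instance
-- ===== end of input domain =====

-- B: a divmod while-loop with a single final last-digit check, instead of A's count-threading recursion; return values proved equal on all inputs.

-- ===== PORT A =====
def ones_single_num (n : Int) (count : Int) : Int :=
  if n = 0 then count
  else
    let count := if PySem.Int.mod n 10 = 1 then count + 1 else count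
    if 10 ≤ n then ones_single_num (PySem.Int.floordiv n 10) count else count
termination_by n.toNat
decreasing_by
  have h : PySem.Int.floordiv n 10 = n / 10 := PySem.Int.floordiv_eq_ediv_of_pos (by omega)
  rw [h]; omega

-- ===== PORT B =====
-- the while-loop of Source B: state (n, count), one divmod step per iteration
def pvStrip (n : Int) (count : Int) : Int × Int :=
  if 10 ≤ n then
    pvStrip (PySem.Int.floordiv n 10)
      (if PySem.Int.mod n 10 = 1 then count + 1 else count)
  else (n, count)
termination_by n.toNat
decreasing_by
  have h : PySem.Int.floordiv n 10 = n / 10 := PySem.Int.floordiv_eq_ediv_of_pos (by omega)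
  rw [h]; omega

def ones_single_num_alt (n : Int) (count : Int) : Int :=
  let p := pvStrip n count
  if PySem.Int.mod p.1 10 = 1 then p.2 + 1 else p.2

-- ===== PRECONDITION & SPEC =====
def Spec_ones_single_num (n : Int) (count : Int) (out : Int) : Prop := out = ones_single_num_alt n count
instance (n : Int) (count : Int) (out : Int) : Decidable (Spec_ones_single_num n count out) := by unfold Spec_ones_single_num; infer_instance

-- ===== CLAIM (what is proved, stated in full; the proofs are below) =====
def Claim_equal_ones_single_num : Prop := ∀ (n : Int) (count : Int), Dom_ones_single_num n count → Spec_ones_single_num n count (ones_single_num n count)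

-- ===== LEMMAS AND PROOFS =====

-- ===== VERDICT (by name: the statement is the Claim_ definition above) =====
-- A and B agree whenever n < 10 (both reduce to the single last-digit check)
lemma small_case (n count : Int) (h : ¬ 10 ≤ n) :
    ones_single_num n count = ones_single_num_alt n count := by
  rw [ones_single_num, ones_single_num_alt, pvStrip, if_neg h]
  by_cases h0 : n = 0
  · subst h0
    simp [PySem.Int.mod]
  · simp only [if_neg h0, if_neg h]

-- main equivalence by strong induction on the magnitude of n
lemma agree (m : Nat) : ∀ n count : Int, n.toNat = m →
    ones_single_num n count = ones_single_num_alt n count := by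
  induction m using Nat.strong_induction_on with
  | _ m ih =>
    intro n count hm
    by_cases h : 10 ≤ n
    · have hdiv : PySem.Int.floordiv n 10 = n / 10 :=
        PySem.Int.floordiv_eq_ediv_of_pos (by omega)
    -- unfold one step on each side; the steps coincide
      rw [ones_single_num, if_neg (by omega : ¬ n = 0), if_pos h,
          ones_single_num_alt, pvStrip, if_pos h]
      exact ih ((n / 10).toNat) (by rw [← hm]; omega) _ _ (by rw [hdiv])
    · exact small_case n count h

-- ===== VERDICT (by name: the statement is the Claim_ definition above) =====
theorem ones_single_num_spec : Claim_equal_ones_single_num := by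
  intro n count _
  exact agree n.toNat n count rfl
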